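-- pv_equiv track=rewrite | github.com/hallucinate-llc/HACC | Invasion of Privacy Memorandum/engine/sokoban_layout_experiments.py | _find_walkable_cell_in_room
-- ===== SOURCE A (Python) =====
-- from typing import Dict, Iterable, List, Optional, Set, Tuple
--
-- Cell = Tuple[int, int]
--
-- Rect = Tuple[int, int, int, int]
--
-- def _find_walkable_cell_in_room(room: Rect, blocked: Set[Cell], width: int, height: int) -> Optional[Cell]:
--     rx, ry, rw, rh = room
--     cx = rx + rw // 2
--     cy = ry + rh // 2
--     candidates: List[Cell] = []
--     for radius in range(max(rw, rh) + 2):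
--         for x in range(rx, rx + rw):
--             for y in range(ry, ry + rh):
--                 if abs(x - cx) + abs(y - cy) == radius:
--                     candidates.append((x, y))
--         for cell in candidates:
--             if 0 <= cell[0] < width and 0 <= cell[1] < height and cell not in blocked:
--                 return cell
--     return None
-- ===== SOURCE B (Python) =====
-- def _find_walkable_cell_in_room(room, blocked, width, height):
--     rx, ry, rw, rh = room
--     cx = rx + rw // 2
--     cy = ry + rh // 2
--     best = None
--     best_d = None
--     for x in range(rx, rx + rw):
--         for y in range(ry, ry + rh):
--             if 0 <= x < width and 0 <= y < height and (x, y) not in blocked: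
--                 d = abs(x - cx) + abs(y - cy)
--                 if best_d is None or d < best_d:
--                     best = (x, y)
--                     best_d = d
--     return best
-- ===== Notes on version B (the rewrite author's own statement) =====
-- stated objective: faster
-- what changed: Replaces the growing-radius ring enumeration with repeated rescans of an accumulated candidate list by a single pass over the room cells that keeps the first walkable cell of minimal manhattan distance to the room center.
import Mathlib
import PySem

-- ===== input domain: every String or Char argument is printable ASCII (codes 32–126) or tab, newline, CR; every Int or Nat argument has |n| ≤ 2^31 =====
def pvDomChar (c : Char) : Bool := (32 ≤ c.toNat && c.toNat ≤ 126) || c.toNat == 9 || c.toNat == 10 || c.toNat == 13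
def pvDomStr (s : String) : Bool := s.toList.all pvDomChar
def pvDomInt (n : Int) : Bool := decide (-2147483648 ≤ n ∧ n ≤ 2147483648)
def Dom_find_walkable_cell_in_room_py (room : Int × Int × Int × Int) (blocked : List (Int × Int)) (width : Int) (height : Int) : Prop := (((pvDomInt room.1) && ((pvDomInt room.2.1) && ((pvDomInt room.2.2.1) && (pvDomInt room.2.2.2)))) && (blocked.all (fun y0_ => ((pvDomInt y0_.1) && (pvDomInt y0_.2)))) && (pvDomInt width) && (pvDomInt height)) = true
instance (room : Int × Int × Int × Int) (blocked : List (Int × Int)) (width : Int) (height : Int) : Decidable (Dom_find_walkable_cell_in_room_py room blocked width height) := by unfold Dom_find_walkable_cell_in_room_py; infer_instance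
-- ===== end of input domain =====

-- B replaces A's growing-radius ring enumeration (which rescans an accumulated candidate
-- list every radius) by a single pass over the room cells keeping the best cell so far;
-- a timing run measures whether that is faster. Same return value everywhere.

-- shared tiny helpers: Python's `abs(x-cx)+abs(y-cy)` and the walkability test
def pvDist (cx cy x y : Int) : Int := ((x - cx).natAbs : Int) + ((y - cy).natAbs : Int)

def pvWalk (blocked : List (Int × Int)) (width height : Int) (c : Int × Int) : Bool :=
  decide (0 ≤ c.1) && decide (c.1 < width) && decide (0 ≤ c.2) && decide (c.2 < height) &&
    !(blocked.contains c)

-- ===== PORT A =====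
-- the `for radius in range(...)` loop with early return; `candidates` accumulates across radii
def pvLoopA (blocked : List (Int × Int)) (width height cx cy rx ry rw rh : Int) :
    List Int → List (Int × Int) → Option (Int × Int)
  | [], _ => none
  | radius :: rs, cand =>
    let cand' := (PySem.List.pyRange rx (rx + rw) 1).foldl
      (fun acc x => (PySem.List.pyRange ry (ry + rh) 1).foldl
        (fun acc2 y => if pvDist cx cy x y = radius then acc2 ++ [(x, y)] else acc2) acc) cand
    match cand'.find? (pvWalk blocked width height) with
    | some c => some c
    | none => pvLoopA blocked width height cx cy rx ry rw rh rs cand'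

def find_walkable_cell_in_room_py (room : Int × Int × Int × Int) (blocked : List (Int × Int)) (width : Int) (height : Int) : Option (Int × Int) :=
  let rx := room.1
  let ry := room.2.1
  let rw := room.2.2.1
  let rh := room.2.2.2
  let cx := rx + PySem.Int.floordiv rw 2
  let cy := ry + PySem.Int.floordiv rh 2
  pvLoopA blocked width height cx cy rx ry rw rh (PySem.List.pyRange 0 (max rw rh + 2) 1) []

-- ===== PORT B =====
-- single pass over the room cells, state = (best, best_d)
def find_walkable_cell_in_room_py_alt (room : Int × Int × Int × Int) (blocked : List (Int × Int)) (width : Int) (height : Int) : Option (Int × Int) :=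
  let rx := room.1
  let ry := room.2.1
  let rw := room.2.2.1
  let rh := room.2.2.2
  let cx := rx + PySem.Int.floordiv rw 2
  let cy := ry + PySem.Int.floordiv rh 2
  let final := (PySem.List.pyRange rx (rx + rw) 1).foldl
    (fun st x => (PySem.List.pyRange ry (ry + rh) 1).foldl
      (fun st2 y =>
        if pvWalk blocked width height (x, y) then
          let d := pvDist cx cy x y
          match st2.2 with
          | none => (some (x, y), some d)
          | some bd => if d < bd then (some (x, y), some d) else st2
        else st2) st)
    ((none, none) : Option (Int × Int) × Option Int)
  final.1

-- ===== PRECONDITION & SPEC =====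
def Spec_find_walkable_cell_in_room_py (room : Int × Int × Int × Int) (blocked : List (Int × Int)) (width : Int) (height : Int) (out : Option (Int × Int)) : Prop := out = find_walkable_cell_in_room_py_alt room blocked width height
instance (room : Int × Int × Int × Int) (blocked : List (Int × Int)) (width : Int) (height : Int) (out : Option (Int × Int)) : Decidable (Spec_find_walkable_cell_in_room_py room blocked width height out) := by unfold Spec_find_walkable_cell_in_room_py; infer_instance

-- ===== CLAIM (what is proved, stated in full; the proofs are below) =====
def Claim_equal_find_walkable_cell_in_room_py : Prop := ∀ (room : Int × Int × Int × Int) (blocked : List (Int × Int)) (width : Int) (height : Int), Dom_find_walkable_cell_in_room_py room blocked width height → Spec_find_walkable_cell_in_room_py room blocked width height (find_walkable_cell_in_room_py room blocked width height)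

-- ===== LEMMAS AND PROOFS =====

-- strict (x,y)-lexicographic order on cells (the order in which both programs visit the room)
def pvPairLt (a b : Int × Int) : Prop := a.1 < b.1 ∨ (a.1 = b.1 ∧ a.2 < b.2)

-- strict (distance, x, y)-lexicographic order; the unique minimum is what both programs return
def pvKLt (k : Int × Int → Int) (a b : Int × Int) : Prop :=
  k a < k b ∨ (k a = k b ∧ pvPairLt a b)

-- the room's cells in visiting order
def pvGrid (rx ry rw rh : Int) : List (Int × Int) :=
  (PySem.List.pyRange rx (rx + rw) 1).flatMap
    (fun x => (PySem.List.pyRange ry (ry + rh) 1).map (fun y => (x, y)))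

-- the common characterisation: `res` is the pvKLt-least walkable cell of L (or none)
def pvGood (W : Int × Int → Bool) (K : Int × Int → Int × Int → Prop)
    (L : List (Int × Int)) (res : Option (Int × Int)) : Prop :=
  (res = none ∧ ∀ c ∈ L, W c = false) ∨
  (∃ c, res = some c ∧ c ∈ L ∧ W c = true ∧ ∀ c' ∈ L, W c' = true → c' ≠ c → K c c')

lemma pvKLt_asymm (k : Int × Int → Int) (a b : Int × Int) :
    pvKLt k a b → pvKLt k b a → False := by
  intro h1 h2; unfold pvKLt pvPairLt at h1 h2; omega

lemma pvGood_unique (W : Int × Int → Bool) (k : Int × Int → Int) (L : List (Int × Int))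
    (r1 r2 : Option (Int × Int)) (h1 : pvGood W (pvKLt k) L r1) (h2 : pvGood W (pvKLt k) L r2) :
    r1 = r2 := by
  rcases h1 with ⟨e1, n1⟩ | ⟨c1, e1, m1, w1, b1⟩ <;> rcases h2 with ⟨e2, n2⟩ | ⟨c2, e2, m2, w2, b2⟩
  · rw [e1, e2]
  · exact absurd w2 (by simp [n1 c2 m2])
  · exact absurd w1 (by simp [n2 c1 m1])
  · rw [e1, e2]
    by_cases hc : c1 = c2
    · rw [hc]
    · exact absurd (pvKLt_asymm k c1 c2 (b1 c2 m2 w2 (Ne.symm hc)) (b2 c1 m1 w1 hc)) id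

lemma pvGood_congr (W : Int × Int → Bool) (K : Int × Int → Int × Int → Prop)
    (M L : List (Int × Int)) (hml : ∀ c, c ∈ M ↔ c ∈ L) (res : Option (Int × Int))
    (h : pvGood W K M res) : pvGood W K L res := by
  rcases h with ⟨e, n⟩ | ⟨c, e, m, w, b⟩
  · exact Or.inl ⟨e, fun c hc => n c ((hml c).2 hc)⟩
  · exact Or.inr ⟨c, e, (hml c).1 m, w, fun c' hc' => b c' ((hml c').2 hc')⟩

-- ---------- A-side ----------

-- the candidates appended at one radius: A's nested x/y loops build grid-filter-by-distance
lemma pvBuild (cx cy r : Int) (xs ys : List Int) (acc : List (Int × Int)) :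
    xs.foldl (fun acc x => ys.foldl
        (fun acc2 y => if pvDist cx cy x y = r then acc2 ++ [(x, y)] else acc2) acc) acc
      = acc ++ (xs.flatMap (fun x => ys.map (fun y => (x, y)))).filter
          (fun c => decide (pvDist cx cy c.1 c.2 = r)) := by
  rw [List.filter_flatMap]
  have inner : ∀ (x : Int) (a : List (Int × Int)),
      ys.foldl (fun acc2 y => if pvDist cx cy x y = r then acc2 ++ [(x, y)] else acc2) a
        = a ++ ((ys.map (fun y => (x, y))).filter (fun c => decide (pvDist cx cy c.1 c.2 = r))) := by
    intro x a
    rw [List.filter_map]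
    have := PySem.List.foldl_append_if (fun y => decide (pvDist cx cy x y = r))
      (fun y => ((x, y) : Int × Int)) ys a
    simpa [Function.comp] using this
  simp only [inner]
  rw [PySem.List.foldl_append_eq_flatMap]

-- A's radius loop returns the first walkable element of the concatenated rings
lemma pvLoopA_eq (blocked : List (Int × Int)) (width height cx cy rx ry rw rh : Int)
    (radii : List Int) (cand : List (Int × Int))
    (hc : cand.find? (pvWalk blocked width height) = none) :
    pvLoopA blocked width height cx cy rx ry rw rh radii cand
      = (cand ++ radii.flatMap (fun r => (pvGrid rx ry rw rh).filter
          (fun c => decide (pvDist cx cy c.1 c.2 = r)))).find? (pvWalk blocked width height) := by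
  induction radii generalizing cand with
  | nil => simpa [pvLoopA] using hc.symm
  | cons r rs ih =>
    rw [pvLoopA]
    have hb := pvBuild cx cy r (PySem.List.pyRange rx (rx + rw) 1)
      (PySem.List.pyRange ry (ry + rh) 1) cand
    simp only [hb]
    rw [show ((pvGrid rx ry rw rh) : List (Int × Int)) = (PySem.List.pyRange rx (rx + rw) 1).flatMap
      (fun x => (PySem.List.pyRange ry (ry + rh) 1).map (fun y => (x, y))) from rfl]
    cases hfind : (cand ++ ((PySem.List.pyRange rx (rx + rw) 1).flatMap
        (fun x => (PySem.List.pyRange ry (ry + rh) 1).map (fun y => (x, y)))).filter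
          (fun c => decide (pvDist cx cy c.1 c.2 = r))).find? (pvWalk blocked width height) with
    | some c =>
      simp only [List.flatMap_cons, ← List.append_assoc, List.find?_append]
      simp only [List.find?_append] at hfind
      rw [hfind]
      rfl
    | none =>
      rw [ih _ hfind]
      simp [List.flatMap_cons, List.append_assoc, pvGrid]

-- find? on a strictly pvKLt-sorted list yields the pvKLt-least walkable element
lemma pvFind_good (W : Int × Int → Bool) (k : Int × Int → Int) (M : List (Int × Int))
    (h : M.Pairwise (pvKLt k)) : pvGood W (pvKLt k) M (M.find? W) := by
  induction M with
  | nil => exact Or.inl ⟨rfl, by simp⟩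
  | cons c t ih =>
    have hct := (List.pairwise_cons.1 h).1
    cases hw : W c with
    | true =>
      rw [List.find?_cons_of_pos hw]
      refine Or.inr ⟨c, rfl, List.mem_cons_self, hw, ?_⟩
      intro c' hc' _ hne
      rcases List.mem_cons.1 hc' with rfl | hmem
      · exact absurd rfl hne
      · exact hct c' hmem
    | false =>
      rw [List.find?_cons_of_neg (by simp [hw])]
      rcases ih (List.Pairwise.of_cons h) with ⟨e, n⟩ | ⟨d, e, m, w, b⟩
      · refine Or.inl ⟨e, ?_⟩
        intro c' hc'
        rcases List.mem_cons.1 hc' with rfl | hmem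
        · exact hw
        · exact n c' hmem
      · refine Or.inr ⟨d, e, List.mem_cons_of_mem c m, w, ?_⟩
        intro c' hc' hw' hne
        rcases List.mem_cons.1 hc' with rfl | hmem
        · rw [hw] at hw'; exact absurd hw' (by simp)
        · exact b c' hmem hw' hne

-- the concatenated rings are strictly pvKLt-increasing
lemma pvRings_pairwise (k : Int × Int → Int) (L : List (Int × Int))
    (hL : L.Pairwise pvPairLt) (radii : List Int) (hr : radii.Pairwise (· < ·)) :
    (radii.flatMap (fun r => L.filter (fun c => decide (k c = r)))).Pairwise (pvKLt k) := by
  induction radii with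
  | nil => simp
  | cons r rs ih =>
    have hrrs := (List.pairwise_cons.1 hr).1
    rw [List.flatMap_cons, List.pairwise_append]
    refine ⟨?_, ih (List.Pairwise.of_cons hr), ?_⟩
    · refine List.Pairwise.imp_of_mem ?_ (List.Pairwise.filter _ hL)
      intro a b ha hb hab
      have hka : k a = r := by simpa using (List.mem_filter.1 ha).2
      have hkb : k b = r := by simpa using (List.mem_filter.1 hb).2
      exact Or.inr ⟨hka.trans hkb.symm, hab⟩
    · intro a ha b hb
      have hka : k a = r := by simpa using (List.mem_filter.1 ha).2
      rcases List.mem_flatMap.1 hb with ⟨r', hr', hb'⟩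
      have hkb : k b = r' := by simpa using (List.mem_filter.1 hb').2
      exact Or.inl (by rw [hka, hkb]; exact hrrs r' hr')

-- the grid is strictly (x,y)-lexicographically increasing
lemma pvGrid_pairwise_aux (ys : List Int) (hy : ys.Pairwise (· < ·)) :
    ∀ xs : List Int, xs.Pairwise (· < ·) →
      (xs.flatMap (fun x => ys.map (fun y => ((x, y) : Int × Int)))).Pairwise pvPairLt := by
  intro xs
  induction xs with
  | nil => simp
  | cons x t ih =>
    intro hx
    have hxs := (List.pairwise_cons.1 hx).1
    rw [List.flatMap_cons, List.pairwise_append]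
    refine ⟨?_, ih (List.Pairwise.of_cons hx), ?_⟩
    · refine List.Pairwise.map _ ?_ hy
      intro a b hab
      exact Or.inr ⟨rfl, hab⟩
    · intro a ha b hb
      rcases List.mem_map.1 ha with ⟨ya, _, rfl⟩
      rcases List.mem_flatMap.1 hb with ⟨x', hx', hb'⟩
      rcases List.mem_map.1 hb' with ⟨yb, _, rfl⟩
      exact Or.inl (hxs x' hx')

lemma pvGrid_pairwise (rx ry rw rh : Int) : (pvGrid rx ry rw rh).Pairwise pvPairLt :=
  pvGrid_pairwise_aux _ (PySem.List.pairwise_lt_pyRange_one ry (ry + rh)) _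
    (PySem.List.pairwise_lt_pyRange_one rx (rx + rw))

-- every room cell lies in some ring: the distance to the centre is < max(rw,rh)+2
lemma pvMem_rings (rx ry rw rh : Int) (c : Int × Int) :
    c ∈ (PySem.List.pyRange 0 (max rw rh + 2) 1).flatMap
        (fun r => (pvGrid rx ry rw rh).filter (fun c => decide
          (pvDist (rx + PySem.Int.floordiv rw 2) (ry + PySem.Int.floordiv rh 2) c.1 c.2 = r)))
      ↔ c ∈ pvGrid rx ry rw rh := by
  constructor
  · intro h
    rcases List.mem_flatMap.1 h with ⟨r, _, hc⟩
    exact (List.mem_filter.1 hc).1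
  · intro h
    have hx : rx ≤ c.1 ∧ c.1 < rx + rw ∧ ry ≤ c.2 ∧ c.2 < ry + rh := by
      rcases List.mem_flatMap.1 h with ⟨x, hx, hc⟩
      rcases List.mem_map.1 hc with ⟨y, hy, rfl⟩
      rw [PySem.List.mem_pyRange_one] at hx
      rw [PySem.List.mem_pyRange_one] at hy
      exact ⟨hx.1, hx.2, hy.1, hy.2⟩
    refine List.mem_flatMap.2 ⟨pvDist (rx + PySem.Int.floordiv rw 2)
      (ry + PySem.Int.floordiv rh 2) c.1 c.2, ?_, List.mem_filter.2 ⟨h, by simp⟩⟩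
    rw [PySem.List.mem_pyRange_one,
      PySem.Int.floordiv_eq_ediv_of_pos (a := rw) (by norm_num),
      PySem.Int.floordiv_eq_ediv_of_pos (a := rh) (by norm_num)]
    unfold pvDist
    rcases le_total rw rh with hm | hm
    · rw [max_eq_right hm]; omega
    · rw [max_eq_left hm]; omega

-- ---------- B-side ----------

-- B's loop body
def pvStepB (W : Int × Int → Bool) (k : Int × Int → Int)
    (st : Option (Int × Int) × Option Int) (c : Int × Int) : Option (Int × Int) × Option Int :=
  if W c then
    match st.2 with
    | none => (some c, some (k c))
    | some bd => if k c < bd then (some c, some (k c)) else st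
  else st

-- invariant of B's accumulator over the processed prefix Pr
def pvStInv (W : Int × Int → Bool) (k : Int × Int → Int) (Pr : List (Int × Int))
    (st : Option (Int × Int) × Option Int) : Prop :=
  (st = (none, none) ∧ ∀ c ∈ Pr, W c = false) ∨
  (∃ c, st = (some c, some (k c)) ∧ c ∈ Pr ∧ W c = true ∧
    ∀ c' ∈ Pr, W c' = true → c' ≠ c → pvKLt k c c')

lemma pvB_inv (W : Int × Int → Bool) (k : Int × Int → Int) (M : List (Int × Int)) :
    ∀ (Pr : List (Int × Int)) (st : Option (Int × Int) × Option Int),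
    (Pr ++ M).Pairwise pvPairLt → pvStInv W k Pr st →
    pvStInv W k (Pr ++ M) (M.foldl (pvStepB W k) st) := by
  induction M with
  | nil => intro Pr st _ h; simpa using h
  | cons m t ih =>
    intro Pr st hp hst
    have hPrm : ∀ c ∈ Pr, pvPairLt c m := by
      rw [List.pairwise_append] at hp
      exact fun c hc => hp.2.2 c hc m List.mem_cons_self
    have hassoc : Pr ++ m :: t = (Pr ++ [m]) ++ t := by simp
    rw [List.foldl_cons, hassoc]
    refine ih (Pr ++ [m]) (pvStepB W k st m) (by rw [← hassoc]; exact hp) ?_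
    -- one step preserves the invariant
    unfold pvStepB
    cases hwm : W m with
    | false =>
      simp only [Bool.false_eq_true, if_false]
      rcases hst with ⟨e, n⟩ | ⟨c, e, mem, w, b⟩
      · refine Or.inl ⟨e, ?_⟩
        intro c hc
        rcases List.mem_append.1 hc with hc | hc
        · exact n c hc
        · rw [List.mem_singleton.1 hc]; exact hwm
      · refine Or.inr ⟨c, e, List.mem_append_left _ mem, w, ?_⟩
        intro c' hc' hw' hne
        rcases List.mem_append.1 hc' with hc' | hc'
        · exact b c' hc' hw' hne
        · rw [List.mem_singleton.1 hc'] at hw'; rw [hwm] at hw'; exact absurd hw' (by simp)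
    | true =>
      simp only [if_true]
      rcases hst with ⟨e, n⟩ | ⟨c, e, mem, w, b⟩
      · rw [e]
        refine Or.inr ⟨m, rfl, List.mem_append_right _ List.mem_cons_self, hwm, ?_⟩
        intro c' hc' hw' hne
        rcases List.mem_append.1 hc' with hc' | hc'
        · rw [n c' hc'] at hw'; exact absurd hw' (by simp)
        · exact absurd (List.mem_singleton.1 hc') hne
      · rw [e]
        show pvStInv W k (Pr ++ [m])
          (if k m < k c then (some m, some (k m)) else (some c, some (k c)))
        by_cases hlt : k m < k c
        · rw [if_pos hlt]
          refine Or.inr ⟨m, rfl, List.mem_append_right _ List.mem_cons_self, hwm, ?_⟩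
          intro c' hc' hw' hne
          rcases List.mem_append.1 hc' with hc' | hc'
          · by_cases hcc : c' = c
            · rw [hcc]; exact Or.inl hlt
            · rcases b c' hc' hw' hcc with h | ⟨heq, _⟩
              · exact Or.inl (by omega)
              · exact Or.inl (by omega)
          · exact absurd (List.mem_singleton.1 hc') hne
        · rw [if_neg hlt]
          refine Or.inr ⟨c, rfl, List.mem_append_left _ mem, w, ?_⟩
          intro c' hc' hw' hne
          rcases List.mem_append.1 hc' with hc' | hc'
          · exact b c' hc' hw' hne
          · rw [List.mem_singleton.1 hc']
            by_cases heq : k c = k m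
            · exact Or.inr ⟨heq, hPrm c mem⟩
            · exact Or.inl (by omega)

lemma pvStInv_good (W : Int × Int → Bool) (k : Int × Int → Int) (L : List (Int × Int))
    (st : Option (Int × Int) × Option Int) (h : pvStInv W k L st) : pvGood W (pvKLt k) L st.1 := by
  rcases h with ⟨e, n⟩ | ⟨c, e, mem, w, b⟩
  · exact Or.inl ⟨by rw [e], n⟩
  · exact Or.inr ⟨c, by rw [e], mem, w, b⟩

-- ---------- glue ----------

theorem pv_main (room : Int × Int × Int × Int) (blocked : List (Int × Int))
    (width height : Int) :
    find_walkable_cell_in_room_py room blocked width height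
      = find_walkable_cell_in_room_py_alt room blocked width height := by
  obtain ⟨rx, ry, rw, rh⟩ := room
  set cx := rx + PySem.Int.floordiv rw 2 with hcx
  set cy := ry + PySem.Int.floordiv rh 2 with hcy
  set W := pvWalk blocked width height with hW
  set k : Int × Int → Int := fun c => pvDist cx cy c.1 c.2 with hk
  set L := pvGrid rx ry rw rh with hLdef
  -- A-side characterisation
  have hA : pvGood W (pvKLt k) L (find_walkable_cell_in_room_py (rx, ry, rw, rh) blocked width height) := by
    have hA1 : find_walkable_cell_in_room_py (rx, ry, rw, rh) blocked width height
        = ((PySem.List.pyRange 0 (max rw rh + 2) 1).flatMap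
            (fun r => L.filter (fun c => decide (k c = r)))).find? W := by
      show pvLoopA blocked width height cx cy rx ry rw rh
          (PySem.List.pyRange 0 (max rw rh + 2) 1) [] = _
      rw [pvLoopA_eq blocked width height cx cy rx ry rw rh _ [] (by simp)]
      rw [List.nil_append]
    rw [hA1]
    refine pvGood_congr W (pvKLt k) _ L ?_ _ (pvFind_good W k _
      (pvRings_pairwise k L (pvGrid_pairwise rx ry rw rh) _
        (PySem.List.pairwise_lt_pyRange_one 0 (max rw rh + 2))))
    intro c
    simpa [hk, hcx, hcy, hLdef] using pvMem_rings rx ry rw rh c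
  -- B-side characterisation
  have hB : pvGood W (pvKLt k) L (find_walkable_cell_in_room_py_alt (rx, ry, rw, rh) blocked width height) := by
    have hB1 : find_walkable_cell_in_room_py_alt (rx, ry, rw, rh) blocked width height
        = (L.foldl (pvStepB W k) (none, none)).1 := by
      show ((PySem.List.pyRange rx (rx + rw) 1).foldl
        (fun st x => (PySem.List.pyRange ry (ry + rh) 1).foldl
          (fun st2 y =>
            if pvWalk blocked width height (x, y) then
              match st2.2 with
              | none => (some (x, y), some (pvDist cx cy x y))
              | some bd => if pvDist cx cy x y < bd then (some (x, y), some (pvDist cx cy x y)) else st2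
            else st2) st)
        ((none, none) : Option (Int × Int) × Option Int)).1 = _
      rw [hLdef]
      unfold pvGrid
      rw [List.foldl_flatMap]
      congr 2
      funext st x
      rw [List.foldl_map]
      rfl
    rw [hB1]
    exact pvStInv_good W k L _ (pvB_inv W k L [] (none, none)
      (by simpa using pvGrid_pairwise rx ry rw rh) (Or.inl ⟨rfl, by simp⟩))
  exact pvGood_unique W k L _ _ hA hB

-- ===== VERDICT (by name: the statement is the Claim_ definition above) =====
theorem find_walkable_cell_in_room_py_spec : Claim_equal_find_walkable_cell_in_room_py := by
  intro room blocked width height _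
  unfold Spec_find_walkable_cell_in_room_py
  exact pv_main room blocked width height
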